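-- pv_equiv track=rewrite | github.com/MartynasJakutis/ChroMS_GUI | ChroMS/Widget_manipulation_functions.py | check_for_not_num_rt
-- ===== SOURCE A (Python) =====
-- def rts_for_return(rts):
--     if type(rts) == list:
--         rts = ",".join(rts)
--     rts_mod = rts if len(rts) <= 30 else rts[ : 30] + " (first 30 symbols)"
--     return rts_mod
--
-- def calculate_only_dot_values(data_values):
--     number_of_only_dots = 0
--     for data_value in data_values:
--         if data_value == ".":
--             number_of_only_dots += 1
--     return number_of_only_dots
--
-- def check_for_not_num_rt(rt_pos_str, rt_dev_str, rt_pos_values, rt_dev_values, for_ms = False):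
--     result = True
--     strings, values = (rt_pos_str, rt_dev_str), (rt_pos_values, rt_dev_values)
--     poss_ent_names = ["'Find m/z 1'", "'Find m/z 2'"] if for_ms else ["'Peak positions'", "'Peak deviations'"]
--     ent_names = [n for n, s in zip(poss_ent_names, strings) if s != None]
--     used_strs = [x for x in strings if x != None]
--     used_values = [x for x in values if x != None]
--
--     are_not_num = [x.replace(".", "").replace(",", "") == "" for x in used_strs]
--     are_dot_num = [calculate_only_dot_values(data_values = x) for x in used_values]
--     ret_strings = [rts_for_return(x) for x in used_strs]
--
--     cond1, cond2 = any([are_not_num[0], are_dot_num[0]]), False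
--     if len(used_strs) > 1:
--         both_not_num, both_dot_num  = all(are_not_num), all(are_dot_num)
--         pos_not_and_dev_dot, dev_not_and_pos_dot = are_not_num[0] and are_dot_num[1], are_not_num[1] and are_dot_num[0]
--         both_entry_prob = [both_not_num, both_dot_num, pos_not_and_dev_dot, dev_not_and_pos_dot]
--         cond2 = any([are_not_num[1], are_dot_num[1]])
--     else:
--         both_entry_prob = [False]
--
--     if any(both_entry_prob):
--         errorkey, entry_names, entry_values, dot_num = ("both", f"{ent_names[0]} and {ent_names[1]}",
--                                                         f"'{ret_strings[0]}' and '{ret_strings[1]}'",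
--                                                         f"({are_dot_num[0]} and {are_dot_num[1]})")
--     elif cond1:
--         errorkey, entry_names, entry_values, dot_num = "one", f"{ent_names[0]}", f"'{ret_strings[0]}'", f"({are_dot_num[0]})"
--     elif cond2:
--         errorkey, entry_names, entry_values, dot_num = "one", f"{ent_names[1]}", f"'{ret_strings[1]}'", f"({are_dot_num[1]})"
--     else:
--         result, errorkey, entry_names, entry_values, dot_num = (False,) + (None,) * 4
--     warning_args = {"entry_names" : entry_names,
--                     "entry_values" : entry_values,
--                     "dot_num" : dot_num}
--     return result, errorkey, warning_args
-- ===== SOURCE B (Python) =====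
-- def check_for_not_num_rt(rt_pos_str, rt_dev_str, rt_pos_values, rt_dev_values, for_ms = False):
--     all_names = ["'Find m/z 1'", "'Find m/z 2'"] if for_ms else ["'Peak positions'", "'Peak deviations'"]
--     names = [n for n, s in zip(all_names, (rt_pos_str, rt_dev_str)) if s is not None]
--     strs = [s for s in (rt_pos_str, rt_dev_str) if s is not None]
--     vals = [v for v in (rt_pos_values, rt_dev_values) if v is not None]
--
--     def fmt(s):
--         return s if len(s) <= 30 else s[:30] + " (first 30 symbols)"
--
--     problems = [(n, fmt(s), v.count("."))
--                 for n, s, v in zip(names, strs, vals)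
--                 if all(ch in ".," for ch in s) or "." in v]
--
--     if len(problems) == 2:
--         (n0, s0, d0), (n1, s1, d1) = problems
--         out = (True, "both", f"{n0} and {n1}", f"'{s0}' and '{s1}'", f"({d0} and {d1})")
--     elif len(problems) == 1:
--         n, s, d = problems[0]
--         out = (True, "one", n, f"'{s}'", f"({d})")
--     else:
--         out = (False, None, None, None, None)
--     result, errorkey, en, ev, dn = out
--     return result, errorkey, {"entry_names": en, "entry_values": ev, "dot_num": dn}
-- ===== Notes on version B (the rewrite author's own statement) =====
-- stated objective: simpler
-- what changed: B builds one filtered list of problematic entries (name, formatted string, dot count) in a single comprehension and pattern-matches on how many problems there are (2/1/0), instead of A's three parallel per-entry lists, separate cond1/cond2 flags and the four-term both_entry_prob disjunction.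
import Mathlib
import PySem

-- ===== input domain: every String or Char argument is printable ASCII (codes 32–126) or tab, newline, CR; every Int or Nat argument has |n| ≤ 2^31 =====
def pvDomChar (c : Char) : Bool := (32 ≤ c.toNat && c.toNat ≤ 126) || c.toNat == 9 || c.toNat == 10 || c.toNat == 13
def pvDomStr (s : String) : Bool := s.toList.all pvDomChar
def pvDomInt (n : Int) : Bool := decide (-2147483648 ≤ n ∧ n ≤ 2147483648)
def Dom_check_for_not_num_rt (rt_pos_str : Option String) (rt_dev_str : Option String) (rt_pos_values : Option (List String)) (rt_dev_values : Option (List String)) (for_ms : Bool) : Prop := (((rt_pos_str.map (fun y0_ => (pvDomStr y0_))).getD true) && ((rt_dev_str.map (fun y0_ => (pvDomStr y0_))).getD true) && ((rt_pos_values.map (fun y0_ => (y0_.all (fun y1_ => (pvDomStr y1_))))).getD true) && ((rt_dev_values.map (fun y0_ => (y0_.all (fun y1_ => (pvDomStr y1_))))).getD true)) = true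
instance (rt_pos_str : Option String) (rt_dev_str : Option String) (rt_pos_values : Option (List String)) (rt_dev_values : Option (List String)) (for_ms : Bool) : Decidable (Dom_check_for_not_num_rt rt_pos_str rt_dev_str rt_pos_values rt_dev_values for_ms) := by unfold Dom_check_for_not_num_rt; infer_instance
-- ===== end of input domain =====

-- B is simpler: one filtered list of problematic entries, then a match on how many there
-- are, replaces A's parallel per-entry lists, cond1/cond2 and the four-term disjunction.

-- ===== PORT A =====
def rts_for_return (rts : String) : String :=
  if PySem.Str.len rts ≤ 30 then rts
  else PySem.Str.slice rts none (some 30) ++ " (first 30 symbols)"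

def calculate_only_dot_values (data_values : List String) : Int :=
  data_values.foldl (fun n v => if v == "." then n + 1 else n) 0

def check_for_not_num_rt (rt_pos_str : Option String) (rt_dev_str : Option String) (rt_pos_values : Option (List String)) (rt_dev_values : Option (List String)) (for_ms : Bool) : Bool × Option String × (List (String × Option String)) :=
  let strings : List (Option String) := [rt_pos_str, rt_dev_str]
  let values : List (Option (List String)) := [rt_pos_values, rt_dev_values]
  let poss_ent_names := if for_ms then ["'Find m/z 1'", "'Find m/z 2'"] else ["'Peak positions'", "'Peak deviations'"]
  let ent_names := (poss_ent_names.zip strings).filterMap (fun ns => if ns.2 ≠ none then some ns.1 else none)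
  let used_strs := strings.filterMap (fun x => x)
  let used_values := values.filterMap (fun x => x)
  let are_not_num := used_strs.map (fun x => PySem.Str.replace (PySem.Str.replace x "." "") "," "" == "")
  let are_dot_num := used_values.map (fun x => calculate_only_dot_values x)
  let ret_strings := used_strs.map (fun x => rts_for_return x)
  -- A indexes are_not_num[0] etc.; under Pre_ every index is in range, ported with getD
  let cond1 := are_not_num.getD 0 false || (are_dot_num.getD 0 0 != 0)
  let bc : List Bool × Bool :=
    if used_strs.length > 1 then
      let both_not_num := are_not_num.all (fun b => b)
      let both_dot_num := are_dot_num.all (fun d => d != 0)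
      let pos_not_and_dev_dot := are_not_num.getD 0 false && (are_dot_num.getD 1 0 != 0)
      let dev_not_and_pos_dot := are_not_num.getD 1 false && (are_dot_num.getD 0 0 != 0)
      ([both_not_num, both_dot_num, pos_not_and_dev_dot, dev_not_and_pos_dot],
       are_not_num.getD 1 false || (are_dot_num.getD 1 0 != 0))
    else ([false], false)
  let r : Bool × Option String × Option String × Option String × Option String :=
    if bc.1.any (fun b => b) then
      (true, some "both",
       some (ent_names.getD 0 "" ++ " and " ++ ent_names.getD 1 ""),
       some ("'" ++ ret_strings.getD 0 "" ++ "' and '" ++ ret_strings.getD 1 "" ++ "'"),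
       some ("(" ++ PySem.Int.toStr (are_dot_num.getD 0 0) ++ " and " ++ PySem.Int.toStr (are_dot_num.getD 1 0) ++ ")"))
    else if cond1 then
      (true, some "one", some (ent_names.getD 0 ""),
       some ("'" ++ ret_strings.getD 0 "" ++ "'"),
       some ("(" ++ PySem.Int.toStr (are_dot_num.getD 0 0) ++ ")"))
    else if bc.2 then
      (true, some "one", some (ent_names.getD 1 ""),
       some ("'" ++ ret_strings.getD 1 "" ++ "'"),
       some ("(" ++ PySem.Int.toStr (are_dot_num.getD 1 0) ++ ")"))
    else (false, none, none, none, none)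
  (r.1, r.2.1, [("entry_names", r.2.2.1), ("entry_values", r.2.2.2.1), ("dot_num", r.2.2.2.2)])

-- ===== PORT B =====
-- Python B's inline generator `all(ch in ".," for ch in s)` as a named helper
def pvIsDotComma (s : String) : Bool := s.toList.all (fun ch => ch == '.' || ch == ',')

def pvFmtB (s : String) : String :=
  if PySem.Str.len s ≤ 30 then s
  else PySem.Str.slice s none (some 30) ++ " (first 30 symbols)"

def check_for_not_num_rt_alt (rt_pos_str : Option String) (rt_dev_str : Option String) (rt_pos_values : Option (List String)) (rt_dev_values : Option (List String)) (for_ms : Bool) : Bool × Option String × (List (String × Option String)) :=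
  let all_names := if for_ms then ["'Find m/z 1'", "'Find m/z 2'"] else ["'Peak positions'", "'Peak deviations'"]
  let names := (all_names.zip [rt_pos_str, rt_dev_str]).filterMap (fun ns => if ns.2.isSome then some ns.1 else none)
  let strs := [rt_pos_str, rt_dev_str].filterMap (fun x => x)
  let vals := [rt_pos_values, rt_dev_values].filterMap (fun x => x)
  let problems : List (String × String × Int) :=
    (names.zip (strs.zip vals)).filterMap (fun e =>
      if pvIsDotComma e.2.1 || e.2.2.contains "." then
        some (e.1, pvFmtB e.2.1, (PySem.List.count e.2.2 "." : Int))
      else none)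
  let out : Bool × Option String × Option String × Option String × Option String :=
    match problems with
    | [(n0, s0, d0), (n1, s1, d1)] =>
      (true, some "both", some (n0 ++ " and " ++ n1),
       some ("'" ++ s0 ++ "' and '" ++ s1 ++ "'"),
       some ("(" ++ PySem.Int.toStr d0 ++ " and " ++ PySem.Int.toStr d1 ++ ")"))
    | [(n, s, d)] =>
      (true, some "one", some n, some ("'" ++ s ++ "'"), some ("(" ++ PySem.Int.toStr d ++ ")"))
    | _ => (false, none, none, none, none)
  (out.1, out.2.1, [("entry_names", out.2.2.1), ("entry_values", out.2.2.2.1), ("dot_num", out.2.2.2.2)])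

-- ===== PRECONDITION & SPEC =====
-- Pre_ excludes exactly the inputs on which A raises IndexError: no entry string given,
-- or fewer value lists than entry strings (A indexes are_not_num[0]/are_dot_num[i] there).
def Pre_check_for_not_num_rt (rt_pos_str : Option String) (rt_dev_str : Option String) (rt_pos_values : Option (List String)) (rt_dev_values : Option (List String)) (for_ms : Bool) : Prop :=
  (rt_pos_str.isSome ∨ rt_dev_str.isSome) ∧
  ((if rt_pos_str.isSome then 1 else 0) + (if rt_dev_str.isSome then 1 else 0) : Nat) ≤
    (if rt_pos_values.isSome then 1 else 0) + (if rt_dev_values.isSome then 1 else 0)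
instance (rt_pos_str : Option String) (rt_dev_str : Option String) (rt_pos_values : Option (List String)) (rt_dev_values : Option (List String)) (for_ms : Bool) : Decidable (Pre_check_for_not_num_rt rt_pos_str rt_dev_str rt_pos_values rt_dev_values for_ms) := by unfold Pre_check_for_not_num_rt; infer_instance

def pvWitness_check_for_not_num_rt : Option String × Option String × Option (List String) × Option (List String) × Bool :=
  (some "1.5", none, some ["1.5"], none, false)

def Spec_check_for_not_num_rt (rt_pos_str : Option String) (rt_dev_str : Option String) (rt_pos_values : Option (List String)) (rt_dev_values : Option (List String)) (for_ms : Bool) (out : Bool × Option String × (List (String × Option String))) : Prop := out = check_for_not_num_rt_alt rt_pos_str rt_dev_str rt_pos_values rt_dev_values for_ms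
instance (rt_pos_str : Option String) (rt_dev_str : Option String) (rt_pos_values : Option (List String)) (rt_dev_values : Option (List String)) (for_ms : Bool) (out : Bool × Option String × (List (String × Option String))) : Decidable (Spec_check_for_not_num_rt rt_pos_str rt_dev_str rt_pos_values rt_dev_values for_ms out) := by unfold Spec_check_for_not_num_rt; infer_instance

-- ===== CLAIM (what is proved, stated in full; the proofs are below) =====
def Claim_equal_check_for_not_num_rt : Prop := ∀ (rt_pos_str : Option String) (rt_dev_str : Option String) (rt_pos_values : Option (List String)) (rt_dev_values : Option (List String)) (for_ms : Bool), Dom_check_for_not_num_rt rt_pos_str rt_dev_str rt_pos_values rt_dev_values for_ms → Pre_check_for_not_num_rt rt_pos_str rt_dev_str rt_pos_values rt_dev_values for_ms → Spec_check_for_not_num_rt rt_pos_str rt_dev_str rt_pos_values rt_dev_values for_ms (check_for_not_num_rt rt_pos_str rt_dev_str rt_pos_values rt_dev_values for_ms)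

-- ===== LEMMAS AND PROOFS =====
theorem calc_dots_eq_count (l : List String) (a : Int) : l.foldl (fun n v => if v = "." then n + 1 else n) a = a + (List.count "." l : Int) := by
  induction l generalizing a with
  | nil => simp
  | cons x xs ih =>
    rw [List.foldl_cons, ih]
    simp only [List.count_cons]
    by_cases h : x = "." <;> simp [h] <;> push_cast <;> omega

theorem replace_go_single (c : Char) : ∀ (fuel : Nat) (l acc : List Char), l.length ≤ fuel →
    PySem.Chars.replace.go [c] [] fuel l acc = acc.reverse ++ l.filter (fun x => !(x == c)) := by
  intro fuel
  induction fuel with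
  | zero =>
    intro l acc h
    have : l = [] := List.eq_nil_of_length_eq_zero (Nat.le_zero.mp h)
    subst this
    simp [PySem.Chars.replace.go]
  | succ n ih =>
    intro l acc h
    cases l with
    | nil => simp [PySem.Chars.replace.go]
    | cons x t =>
      rw [PySem.Chars.replace.go]
      by_cases hx : x = c
      · simp [List.isPrefixOf, hx, ih t _ (by simpa using h)]
      · simp [List.isPrefixOf, hx, Ne.symm hx, ih t _ (by simpa using h)]

theorem replace_single (l : List Char) (c : Char) :
    PySem.Chars.replace l [c] [] = l.filter (fun x => !(x == c)) := by
  rw [PySem.Chars.replace]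
  simp [replace_go_single c l.length l [] le_rfl]

theorem notnum_eq (x : String) :
    (PySem.Str.replace (PySem.Str.replace x "." "") "," "" == "") = pvIsDotComma x := by
  rw [pvIsDotComma]
  have h : (PySem.Str.replace (PySem.Str.replace x "." "") "," "").toList
      = x.toList.filter (fun ch => !(ch == '.') && !(ch == ',')) := by
    have e1 : (".".toList : List Char) = ['.'] := rfl
    have e2 : (",".toList : List Char) = [','] := rfl
    have e3 : ("".toList : List Char) = [] := rfl
    rw [PySem.Str.toList_replace, PySem.Str.toList_replace, e1, e2, e3, replace_single,
      replace_single, List.filter_filter]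
    exact List.filter_congr (fun a _ => by cases h1 : a == '.' <;> cases h2 : a == ',' <;> simp [h1, h2])
  rw [Bool.eq_iff_iff]
  simp only [beq_iff_eq, List.all_eq_true]
  constructor
  · intro he ch hmem
    by_contra hch
    simp only [Bool.or_eq_true_iff, not_or, Bool.not_eq_true, beq_eq_false_iff_ne] at hch
    have hm : ch ∈ (PySem.Str.replace (PySem.Str.replace x "." "") "," "").toList := by
      rw [h]; simp [List.mem_filter, hmem, hch.1, hch.2]
    rw [he] at hm; simp at hm
  · intro hall
    apply String.toList_eq_nil_iff.mp
    rw [h]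
    apply List.filter_eq_nil_iff.mpr
    intro a ha
    have := hall a ha
    rcases Bool.or_eq_true_iff.mp this with h' | h' <;> simp [beq_iff_eq.mp h']

theorem pvFmtB_eq (s : String) : pvFmtB s = rts_for_return s := rfl

theorem calc_eq_pycount (v : List String) :
    calculate_only_dot_values v = (PySem.List.count v "." : Int) := by
  simp [calculate_only_dot_values, calc_dots_eq_count, PySem.List.count]

theorem dot_cond (v : List String) :
    (((PySem.List.count v "." : Nat) : Int) != 0) = v.contains "." := by
  by_cases h : "." ∈ v
  · simp [PySem.List.count, h, List.count_pos_iff.mpr h, bne, Int.natCast_eq_zero,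
      Nat.ne_of_gt (List.count_pos_iff.mpr h)]
  · simp [PySem.List.count, List.count_eq_zero.mpr h, h]

-- ===== VERDICT (by name: the statement is the Claim_ definition above) =====
set_option maxRecDepth 8000 in
theorem check_for_not_num_rt_spec : Claim_equal_check_for_not_num_rt := by
  intro ps ds pv dv fm _ hpre
  unfold Spec_check_for_not_num_rt
  obtain ⟨h1, h2⟩ := hpre
  cases ps <;> cases ds <;> cases pv <;> cases dv <;> simp at h1 h2 <;> cases fm <;>
    first
      | (rename_i s t v w _hdom
         cases hA0 : pvIsDotComma s <;> cases hA1 : pvIsDotComma t <;>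
         by_cases hd0 : "." ∈ v <;> by_cases hd1 : "." ∈ w <;>
         simp [check_for_not_num_rt, check_for_not_num_rt_alt, calc_eq_pycount, notnum_eq,
           dot_cond, pvFmtB_eq, List.count_eq_zero, not_not, hA0, hA1, hd0, hd1])
      | (simp [check_for_not_num_rt, check_for_not_num_rt_alt, calc_eq_pycount, notnum_eq,
           dot_cond, pvFmtB_eq, List.count_eq_zero, not_not] <;>
         first
           | rfl
           | (split_ifs with h <;> simp [h]))
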